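-- pv_equiv track=rewrite | github.com/JingfengYang/Disfluency-Project | preprocessPTBIO.py | stat
-- ===== SOURCE A (Python) =====
-- def stat(sents):
--     difsents=0
--     muti=0
--     nomo=0
--     for sent in sents:
--         tag=0
--         for t in sent:
--             if t[2]=='BE':
--                 muti+=1
--                 tag=1
--             if t[2]=='BE_IP':
--                 nomo+=1
--                 tag=1
--         if tag==1:
--             difsents+=1
--     return muti,nomo,muti+nomo,difsents
-- ===== SOURCE B (Python) =====
-- def stat(sents):
--     tags = [t[2] for sent in sents for t in sent]
--     muti = tags.count('BE')
--     nomo = tags.count('BE_IP')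
--     difsents = sum(1 for sent in sents
--                    if any(t[2] in ('BE', 'BE_IP') for t in sent))
--     return muti, nomo, muti + nomo, difsents
-- ===== Notes on version B (the rewrite author's own statement) =====
-- stated objective: simpler
-- what changed: Replaced the single fused loop with mutable counters and a per-sentence tag flag by three independent passes: flatten tags once and use list.count for the two tag totals, and count affected sentences with an early-exit any() per sentence.
import Mathlib
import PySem

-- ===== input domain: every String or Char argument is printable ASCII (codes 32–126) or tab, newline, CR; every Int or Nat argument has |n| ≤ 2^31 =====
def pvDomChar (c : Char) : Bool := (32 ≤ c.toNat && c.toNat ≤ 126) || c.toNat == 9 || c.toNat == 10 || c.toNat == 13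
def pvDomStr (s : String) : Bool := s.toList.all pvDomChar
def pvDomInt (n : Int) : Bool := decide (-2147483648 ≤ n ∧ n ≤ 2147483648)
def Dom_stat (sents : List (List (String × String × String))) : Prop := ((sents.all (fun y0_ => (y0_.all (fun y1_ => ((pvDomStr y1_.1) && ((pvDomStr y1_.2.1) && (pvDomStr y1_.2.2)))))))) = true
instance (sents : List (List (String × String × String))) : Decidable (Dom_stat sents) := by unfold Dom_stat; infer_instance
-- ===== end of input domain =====

-- ===== PORT A =====
-- B replaces A's fused counter loop by three independent passes; same return values, proved below.
-- A-side helpers: the two loop bodies of A, named so the ports and proofs can refer to them.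
def statInner (s : Int × Int × Int) (t : String × String × String) : Int × Int × Int :=
  let s := if t.2.2 == "BE" then (s.1 + 1, s.2.1, (1 : Int)) else s
  if t.2.2 == "BE_IP" then (s.1, s.2.1 + 1, (1 : Int)) else s

def statOuter (acc : Int × Int × Int) (sent : List (String × String × String)) : Int × Int × Int :=
  let inner := sent.foldl statInner (acc.2.1, acc.2.2, (0 : Int))
  if inner.2.2 == 1 then (acc.1 + 1, inner.1, inner.2.1) else (acc.1, inner.1, inner.2.1)

def stat (sents : List (List (String × String × String))) : Int × Int × Int × Int :=
  let st := sents.foldl statOuter ((0 : Int), (0 : Int), (0 : Int))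
  (st.2.1, st.2.2, st.2.1 + st.2.2, st.1)

-- ===== PORT B =====
def stat_alt (sents : List (List (String × String × String))) : Int × Int × Int × Int :=
  let tags := (sents.flatMap (fun sent => sent)).map (fun t => t.2.2)
  let muti : Int := PySem.List.count tags "BE"
  let nomo : Int := PySem.List.count tags "BE_IP"
  let difsents : Int :=
    ((sents.filter (fun sent => sent.any (fun t => t.2.2 == "BE" || t.2.2 == "BE_IP"))).length : Int)
  (muti, nomo, muti + nomo, difsents)

-- ===== PRECONDITION & SPEC =====
def Spec_stat (sents : List (List (String × String × String))) (out : Int × Int × Int × Int) : Prop := out = stat_alt sents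
instance (sents : List (List (String × String × String))) (out : Int × Int × Int × Int) : Decidable (Spec_stat sents out) := by unfold Spec_stat; infer_instance

-- ===== CLAIM (what is proved, stated in full; the proofs are below) =====
def Claim_equal_stat : Prop := ∀ (sents : List (List (String × String × String))), Dom_stat sents → Spec_stat sents (stat sents)

-- ===== LEMMAS AND PROOFS =====

-- the inner loop adds the BE / BE_IP counts of the sentence and sets tag to 1 iff a matching token occurs
theorem stat_inner (sent : List (String × String × String)) (m n tag : Int) :
    sent.foldl statInner (m, n, tag)
    = (m + ((sent.map (fun t => t.2.2)).count "BE" : Int),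
       n + ((sent.map (fun t => t.2.2)).count "BE_IP" : Int),
       if sent.any (fun t => t.2.2 == "BE" || t.2.2 == "BE_IP") then 1 else tag) := by
  induction sent generalizing m n tag with
  | nil => simp
  | cons t rest ih =>
      rw [List.foldl_cons]
      by_cases h1 : t.2.2 = "BE" <;> by_cases h2 : t.2.2 = "BE_IP"
      · rw [h2] at h1; simp at h1
      · have hs : statInner (m, n, tag) t = (m + 1, n, 1) := by simp [statInner, h1, h2]
        rw [hs, ih]
        simp [List.count_cons, h1, h2]
        push_cast; ring
      · have hs : statInner (m, n, tag) t = (m, n + 1, 1) := by simp [statInner, h1, h2]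
        rw [hs, ih]
        simp [List.count_cons, h1, h2]
        push_cast; ring
      · have hs : statInner (m, n, tag) t = (m, n, tag) := by simp [statInner, h1, h2]
        rw [hs, ih]
        simp only [List.any_cons, beq_eq_false_iff_ne.mpr h1, beq_eq_false_iff_ne.mpr h2,
          Bool.false_or, List.map_cons, List.count_cons, beq_iff_eq]
        simp [h1, h2]

-- the outer loop accumulates the three totals
theorem stat_outer (sents : List (List (String × String × String))) (d m n : Int) :
    sents.foldl statOuter (d, m, n)
    = (d + ((sents.filter (fun sent => sent.any (fun t => t.2.2 == "BE" || t.2.2 == "BE_IP"))).length : Int),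
       m + (((sents.flatMap (fun sent => sent)).map (fun t => t.2.2)).count "BE" : Int),
       n + (((sents.flatMap (fun sent => sent)).map (fun t => t.2.2)).count "BE_IP" : Int)) := by
  induction sents generalizing d m n with
  | nil => simp
  | cons sent rest ih =>
      rw [List.foldl_cons]
      have hs : statOuter (d, m, n) sent
          = ((if sent.any (fun t => t.2.2 == "BE" || t.2.2 == "BE_IP") then d + 1 else d),
             m + ((sent.map (fun t => t.2.2)).count "BE" : Int),
             n + ((sent.map (fun t => t.2.2)).count "BE_IP" : Int)) := by
        simp only [statOuter, stat_inner]
        by_cases h : sent.any (fun t => t.2.2 == "BE" || t.2.2 == "BE_IP") <;> simp [h]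
      rw [hs]
      by_cases h : sent.any (fun t => t.2.2 == "BE" || t.2.2 == "BE_IP") <;>
        simp [h, ih, List.filter_cons, List.count_append] <;>
        (try refine ⟨?_, ?_, ?_⟩) <;> (try refine ⟨?_, ?_⟩) <;> push_cast <;> ring

-- ===== VERDICT (by name: the statement is the Claim_ definition above) =====
theorem stat_spec : Claim_equal_stat := by
  intro sents _
  show stat sents = stat_alt sents
  simp [stat, stat_alt, stat_outer, PySem.List.count_eq]
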